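-- pv_equiv track=rewrite | github.com/jmlinger/trybe_course_projects | src/analyze_log.py | never_come_days
-- ===== SOURCE A (Python) =====
-- from collections import Counter
--
-- def never_come_days(customer, data):
--     all_days = [
--         item['day_of_week'] for item in data
--     ]
--     visited_days = [
--         item['day_of_week']
--         for item in data if item['client_name'] == customer
--     ]
--     unique_all_days = set(list(Counter(all_days)))
--     unique_visited_days = set(list(Counter(visited_days)))
--     return unique_all_days.difference(unique_visited_days)
-- ===== SOURCE B (Python) =====
-- def never_come_days(customer, data):
--     visitors = {}
--     for item in data:
--         visitors.setdefault(item['day_of_week'], set()).add(item['client_name'])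
--     return {day for day, names in visitors.items() if customer not in names}
-- ===== Notes on version B (the rewrite author's own statement) =====
-- stated objective: simpler
-- what changed: B builds a day-to-customers index in one pass over data and returns the days whose customer set misses the given customer, instead of A's two flat comprehension passes, Counter-based dedup and set difference.
import Mathlib
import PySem

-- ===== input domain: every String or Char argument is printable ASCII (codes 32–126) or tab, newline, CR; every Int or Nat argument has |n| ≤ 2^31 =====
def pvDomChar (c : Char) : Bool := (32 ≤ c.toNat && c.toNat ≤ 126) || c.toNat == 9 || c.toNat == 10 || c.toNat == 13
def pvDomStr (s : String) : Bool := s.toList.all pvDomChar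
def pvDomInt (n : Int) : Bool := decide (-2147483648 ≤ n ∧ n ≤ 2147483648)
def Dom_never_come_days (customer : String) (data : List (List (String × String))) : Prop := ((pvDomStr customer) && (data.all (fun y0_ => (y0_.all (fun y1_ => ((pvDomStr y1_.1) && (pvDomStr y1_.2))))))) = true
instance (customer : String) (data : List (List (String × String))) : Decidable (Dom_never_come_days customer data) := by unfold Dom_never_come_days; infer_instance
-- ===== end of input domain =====

-- B replaces A's two flat comprehensions + Counter dedup + set difference by a single
-- pass building a day → set-of-customers index, then a membership filter over it (objective: simpler).

-- item['k'] : first-match lookup in the row, total under Pre_ (both keys present)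
def pvGet (row : List (String × String)) (k : String) : String :=
  ((PySem.Dict.mk row).get? k).getD ""

-- ===== PORT A =====
def never_come_days (customer : String) (data : List (List (String × String))) : List String :=
  let all_days := data.map (fun item => pvGet item "day_of_week")
  let visited_days := (data.filter (fun item => pvGet item "client_name" == customer)).map
      (fun item => pvGet item "day_of_week")
  let unique_all_days : PySem.Set String := PySem.Set.ofList (PySem.Dict.counter all_days).keys
  let unique_visited_days : PySem.Set String := PySem.Set.ofList (PySem.Dict.counter visited_days).keys
  PySem.Set.diff unique_all_days unique_visited_days

-- ===== PORT B =====
def never_come_days_alt (customer : String) (data : List (List (String × String))) : List String :=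
  let visitors : PySem.Dict String (PySem.Set String) :=
    data.foldl (fun d item =>
      d.modify (pvGet item "day_of_week") PySem.Set.empty
        (fun s => PySem.Set.add s (pvGet item "client_name"))) PySem.Dict.empty
  (visitors.items.filter (fun p => !(PySem.Set.contains p.2 customer))).map (fun p => p.1)

-- ===== PRECONDITION & SPEC =====
-- A raises KeyError when a row lacks 'day_of_week' or 'client_name'; Pre_ requires both keys in every row.
def Pre_never_come_days (customer : String) (data : List (List (String × String))) : Prop :=
  (data.all (fun row => (PySem.Dict.mk row).contains "day_of_week"
                      && (PySem.Dict.mk row).contains "client_name")) = true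
instance (customer : String) (data : List (List (String × String))) : Decidable (Pre_never_come_days customer data) := by unfold Pre_never_come_days; infer_instance

def pvWitness_never_come_days : String × (List (List (String × String))) :=
  ("ana", [[("day_of_week", "mon"), ("client_name", "ana")],
           [("day_of_week", "tue"), ("client_name", "bob")]])

def Spec_never_come_days (customer : String) (data : List (List (String × String))) (out : List String) : Prop := out = never_come_days_alt customer data
instance (customer : String) (data : List (List (String × String))) (out : List String) : Decidable (Spec_never_come_days customer data out) := by unfold Spec_never_come_days; infer_instance

-- ===== CLAIM (what is proved, stated in full; the proofs are below) =====
def Claim_equal_never_come_days : Prop := ∀ (customer : String) (data : List (List (String × String))), Dom_never_come_days customer data → Pre_never_come_days customer data → Spec_never_come_days customer data (never_come_days customer data)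

-- ===== LEMMAS AND PROOFS =====

-- Set.ofList leaves a Nodup list unchanged (foldl add over fresh elements appends).
theorem pv_foldl_add_of_fresh {acc l : List String} (hnd : l.Nodup)
    (hfresh : ∀ x ∈ l, x ∉ acc) : List.foldl PySem.Set.add acc l = acc ++ l := by
  induction l generalizing acc with
  | nil => simp
  | cons x xs ih =>
    have hx : x ∉ acc := hfresh x (by simp)
    have : PySem.Set.add acc x = acc ++ [x] := by
      simp [PySem.Set.add, PySem.Set.contains, hx]
    rw [List.foldl_cons, this, ih hnd.of_cons]
    · simp
    · intro y hy
      simp only [List.mem_append, List.mem_singleton]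
      rintro (h | rfl)
      · exact hfresh y (by simp [hy]) h
      · exact (List.nodup_cons.mp hnd).1 hy

theorem pv_ofList_nodup {l : List String} (hnd : l.Nodup) : PySem.Set.ofList l = l := by
  simpa [PySem.Set.ofList, PySem.Set.empty] using pv_foldl_add_of_fresh hnd (by simp)

-- contains of Set.add, Boolean form
theorem pv_contains_add (s : PySem.Set String) (x c : String) :
    PySem.Set.contains (PySem.Set.add s x) c = (PySem.Set.contains s c || c == x) := by
  rw [Bool.eq_iff_iff]
  simp [PySem.Set.contains, PySem.Set.mem_add, beq_iff_eq]

-- the grouping fold: membership of `customer` in the bucket of key k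
theorem pv_group_contains (customer k : String) (l : List (List (String × String)))
    (d : PySem.Dict String (PySem.Set String)) :
    PySem.Set.contains
      ((l.foldl (fun d item =>
          d.modify (pvGet item "day_of_week") PySem.Set.empty
            (fun s => PySem.Set.add s (pvGet item "client_name"))) d).getD k PySem.Set.empty)
      customer
    = (PySem.Set.contains (d.getD k PySem.Set.empty) customer
       || l.any (fun item => pvGet item "day_of_week" == k && pvGet item "client_name" == customer)) := by
  induction l generalizing d with
  | nil => simp
  | cons it l ih =>
    rw [List.foldl_cons, ih]
    by_cases hk : k = pvGet it "day_of_week"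
    · subst hk
      rw [PySem.Dict.getD_modify, if_pos rfl, pv_contains_add, Bool.eq_iff_iff]
      simp only [List.any_cons, beq_iff_eq, Bool.or_eq_true, Bool.and_eq_true]
      tauto
    · rw [PySem.Dict.getD_modify, if_neg hk]
      have hne : (pvGet it "day_of_week" == k) = false := by
        exact beq_eq_false_iff_ne.mpr fun h => hk h.symm
      simp [List.any_cons, hne]

-- membership in the visited-days set, Boolean form
theorem pv_visited_contains (customer k : String) (data : List (List (String × String))) :
    PySem.Set.contains
      (PySem.Set.ofList ((data.filter (fun item => pvGet item "client_name" == customer)).map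
        (fun item => pvGet item "day_of_week"))) k
    = data.any (fun item => pvGet item "day_of_week" == k && pvGet item "client_name" == customer) := by
  rw [Bool.eq_iff_iff]
  simp only [PySem.Set.contains, List.contains_iff_mem, PySem.Set.mem_ofList, List.mem_map,
    List.mem_filter, List.any_eq_true, Bool.and_eq_true, beq_iff_eq]
  constructor
  · rintro ⟨it, ⟨hmem, hname⟩, hday⟩; exact ⟨it, hmem, hday, hname⟩
  · rintro ⟨it, hmem, hday, hname⟩; exact ⟨it, ⟨hmem, hname⟩, hday⟩

theorem never_come_days_eq (customer : String) (data : List (List (String × String))) :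
    never_come_days customer data = never_come_days_alt customer data := by
  unfold never_come_days never_come_days_alt
  simp only
  set day := fun item => pvGet item "day_of_week" with hday
  set step := fun (d : PySem.Dict String (PySem.Set String)) item =>
      d.modify (pvGet item "day_of_week") PySem.Set.empty
        (fun s => PySem.Set.add s (pvGet item "client_name")) with hstep
  have hnd : (data.foldl step PySem.Dict.empty).keys.Nodup := by
    rw [hstep]
    exact PySem.Dict.nodup_keys_foldl_modify_key data day PySem.Set.empty
      (fun d x => fun s => PySem.Set.add s (pvGet x "client_name")) PySem.Dict.empty (by simp)
  have hkeys : (data.foldl step PySem.Dict.empty).keys = PySem.Set.ofList (data.map day) := by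
    rw [hstep]
    rw [PySem.Dict.keys_foldl_modify_key data day PySem.Set.empty
      (fun d x => fun s => PySem.Set.add s (pvGet x "client_name")) PySem.Dict.empty]
    simp [PySem.Set.update, PySem.Set.ofList, PySem.Dict.keys_empty, PySem.Set.empty]
  rw [PySem.Dict.items_eq_map_keys _ hnd PySem.Set.empty, List.filter_map, List.map_map]
  have hcomp : ((fun p => p.1) ∘ fun k => (k, (data.foldl step PySem.Dict.empty).getD k PySem.Set.empty))
      = fun (k : String) => k := rfl
  rw [hcomp, List.map_id_fun']
  rw [PySem.Dict.keys_counter, PySem.Dict.keys_counter,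
      pv_ofList_nodup (PySem.Set.nodup_ofList _), pv_ofList_nodup (PySem.Set.nodup_ofList _)]
  rw [hkeys]
  unfold PySem.Set.diff
  apply List.filter_congr
  intro k _
  simp only [Function.comp]
  rw [pv_visited_contains customer k data]
  rw [pv_group_contains customer k data PySem.Dict.empty]
  simp

-- ===== VERDICT (by name: the statement is the Claim_ definition above) =====
theorem never_come_days_spec : Claim_equal_never_come_days := by
  intro customer data _ _
  unfold Spec_never_come_days
  exact never_come_days_eq customer data
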